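-- pv_equiv track=rewrite | github.com/mbartnicki80/WDI | zestaw7/zad16zestaw7.py | osem
-- ===== SOURCE A (Python) =====
-- def osem(ele):
--
--     sum = [0]*8
--     while ele!=0:
--         sum[ele%8] += 1
--         ele //= 8
--
--     if sum[5]%2==0:
--         return True
--     return False
-- ===== SOURCE B (Python) =====
-- def osem(ele):
--     return oct(ele).count('5') % 2 == 0
-- ===== Notes on version B (the rewrite author's own statement) =====
-- stated objective: simpler
-- what changed: B replaces A's modulo/floor-division digit loop with a size-8 tally array by one call to oct() and a character count of '5', checking that count's parity.
import Mathlib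
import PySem

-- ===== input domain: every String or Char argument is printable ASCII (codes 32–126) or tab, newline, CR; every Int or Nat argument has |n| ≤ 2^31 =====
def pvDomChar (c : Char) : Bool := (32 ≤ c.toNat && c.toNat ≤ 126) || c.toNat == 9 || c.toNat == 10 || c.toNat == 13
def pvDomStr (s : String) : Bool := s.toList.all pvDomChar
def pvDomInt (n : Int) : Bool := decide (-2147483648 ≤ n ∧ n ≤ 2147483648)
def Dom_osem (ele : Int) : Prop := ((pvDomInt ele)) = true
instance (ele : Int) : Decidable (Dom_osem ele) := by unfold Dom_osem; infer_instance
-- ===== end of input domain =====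

-- B replaces A's modulo/floor-division digit loop (size-8 tally array) by counting the digit 5
-- in the octal representation and checking parity; objective: simpler. A loops forever on
-- negative ele, hence Pre_osem requires 0 ≤ ele.


-- ===== PORT A =====
-- while ele != 0: sum[ele%8] += 1; ele //= 8 — ported with fuel ele.natAbs+1, which exceeds the
-- number of iterations for every ele ≥ 0 (each step floor-divides by 8). The index ele%8 is
-- always in [0,8) (Python % with positive divisor), so sum[i] is read/written via getD/set.
def osemLoop : Nat → Int → List Int → List Int
  | 0, _, s => s
  | f + 1, ele, s =>
      if ele ≠ 0 then
        let i := (PySem.Int.mod ele 8).toNat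
        osemLoop f (PySem.Int.floordiv ele 8) (s.set i (s.getD i 0 + 1))
      else s

def osem (ele : Int) : Bool :=
  if PySem.Int.mod ((osemLoop (ele.natAbs + 1) ele (List.replicate 8 0)).getD 5 0) 2 = 0
  then true else false

-- ===== PORT B =====
-- oct(ele).count('5') % 2 == 0 — oct()'s digit string is ported as Nat.digits 8 (exact for
-- ele ≥ 0, the whole of Pre_osem); counting '5' chars = counting the digit 5.
def osem_alt (ele : Int) : Bool :=
  (Nat.digits 8 ele.toNat).count 5 % 2 == 0

-- ===== PRECONDITION & SPEC =====
-- A's while loop never terminates for negative ele (ele //= 8 stabilises at -1), so those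
-- inputs are excluded: Pre_osem admits exactly the inputs on which the Python A returns.
def Pre_osem (ele : Int) : Prop := 0 ≤ ele
instance (ele : Int) : Decidable (Pre_osem ele) := by unfold Pre_osem; infer_instance
def pvWitness_osem : Int := 45

def Spec_osem (ele : Int) (out : Bool) : Prop := out = osem_alt ele
instance (ele : Int) (out : Bool) : Decidable (Spec_osem ele out) := by unfold Spec_osem; infer_instance

-- ===== CLAIM (what is proved, stated in full; the proofs are below) =====
def Claim_equal_osem : Prop := ∀ (ele : Int), Dom_osem ele → Pre_osem ele → Spec_osem ele (osem ele)

-- ===== LEMMAS AND PROOFS =====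

-- Loop invariant: with enough fuel, slot 5 of the tally ends at its start value plus the
-- number of 5-digits in the octal expansion of n.
theorem osemLoop_getD5 (fuel : Nat) : ∀ (n : Nat) (s : List Int), n < fuel → s.length = 8 →
    (osemLoop fuel (n : Int) s).getD 5 0 = s.getD 5 0 + (Nat.digits 8 n).count 5 := by
  induction fuel with
  | zero => intro n s h; omega
  | succ f ih =>
    intro n s hn hs
    by_cases h0 : n = 0
    · subst h0; simp [osemLoop]
    · have hne : (n : Int) ≠ 0 := by exact_mod_cast h0
      rw [osemLoop, if_pos hne]
      have hmod : PySem.Int.mod (n : Int) 8 = ((n % 8 : Nat) : Int) := by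
        exact_mod_cast PySem.Int.mod_natCast n 8
      have hdiv : PySem.Int.floordiv (n : Int) 8 = ((n / 8 : Nat) : Int) := by
        exact_mod_cast PySem.Int.floordiv_natCast n 8
      have hlt : n / 8 < f := by
        have := Nat.div_lt_self (Nat.pos_of_ne_zero h0) (by norm_num : 1 < 8)
        omega
      have hmr : n % 8 < 8 := Nat.mod_lt _ (by norm_num)
      rw [hmod, hdiv]
      have htoNat : (((n % 8 : Nat) : Int)).toNat = n % 8 := by omega
      rw [htoNat]
      have hlen : (s.set (n % 8) (s.getD (n % 8) 0 + 1)).length = 8 := by simp [hs]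
      rw [ih (n / 8) _ hlt hlen]
      rw [Nat.digits_def' (by norm_num : 1 < 8) (Nat.pos_of_ne_zero h0)]
      rw [List.count_cons]
      by_cases h5 : n % 8 = 5
      · rw [h5]
        have hset : (s.set 5 (s.getD 5 0 + 1)).getD 5 0 = s.getD 5 0 + 1 := by
          simp [List.getD, List.getElem?_set_self (by omega : 5 < s.length)]
        rw [hset]
        simp; ring
      · have hset : (s.set (n % 8) (s.getD (n % 8) 0 + 1)).getD 5 0 = s.getD 5 0 := by
          simp [List.getD, List.getElem?_set_ne (by omega : n % 8 ≠ 5)]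
        rw [hset]
        simp [h5]

-- ===== VERDICT (by name: the statement is the Claim_ definition above) =====
theorem osem_spec : Claim_equal_osem := by
  intro ele _ hpre
  have h0 : (0:Int) ≤ ele := hpre
  obtain ⟨n, rfl⟩ : ∃ n : Nat, ele = (n : Int) := ⟨ele.toNat, by omega⟩
  have hloop := osemLoop_getD5 (n + 1) n (List.replicate 8 0) (Nat.lt_succ_self n) (by simp)
  show osem (n : Int) = osem_alt (n : Int)
  unfold osem osem_alt
  simp only [Int.natAbs_natCast, Int.toNat_natCast]
  have hrep : (List.replicate 8 (0:Int)).getD 5 0 = 0 := by decide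
  rw [hrep] at hloop
  rw [zero_add] at hloop
  simp only [hloop]
  have hmod2 : PySem.Int.mod (((Nat.digits 8 n).count 5 : Nat) : Int) 2
      = (((Nat.digits 8 n).count 5 % 2 : Nat) : Int) :=
    PySem.Int.mod_natCast _ 2
  simp only [hmod2]
  rcases Nat.mod_two_eq_zero_or_one ((Nat.digits 8 n).count 5) with h | h <;> simp [h]
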